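-- pv_equiv track=rewrite | github.com/Martlex/Project_01 | project_1.py | text_analysis
-- ===== SOURCE A (Python) =====
-- def text_analysis(sentence_container: str) -> tuple:
--     """core function for analyze required text via user option"""
--
--     get_word_count: int = 0  #  number of words in analyzed text
--     number_titlecase_words: int = 0  #  number of titlecase words
--     number_uppercase_words: int = 0  #  number of uppercase words
--     number_lowercase_words: int = 0  #  number of lowercase words
--     number_numeric_strings: int = 0  #  number of numeric strings
--     sum_numeric_stings: int = 0  # sum all the numbers
--
--     # business logic
--     get_word_count = len(sentence_container)
--     for word in sentence_container:
--         if word.istitle():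
--             number_titlecase_words = number_titlecase_words + 1
--         if word.isupper():
--             if word.isalpha():
--                 number_uppercase_words = number_uppercase_words + 1
--         if word.islower():
--             number_lowercase_words = number_lowercase_words + 1
--         if word.isnumeric():
--             number_numeric_strings = number_numeric_strings + 1
--             sum_numeric_stings = sum_numeric_stings + int(word)
--
--     # outputs from processing
--     return (
--         get_word_count,
--         number_titlecase_words,
--         number_uppercase_words,
--         number_lowercase_words,
--         number_numeric_strings,
--         sum_numeric_stings,
--     )
-- ===== SOURCE B (Python) =====
-- def text_analysis(sentence_container: str) -> tuple:
--     """core function for analyze required text via user option"""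
--     numerics = [int(w) for w in sentence_container if w.isnumeric()]
--     return (
--         len(sentence_container),
--         sum(1 for w in sentence_container if w.istitle()),
--         sum(1 for w in sentence_container if w.isupper() and w.isalpha()),
--         sum(1 for w in sentence_container if w.islower()),
--         len(numerics),
--         sum(numerics),
--     )
-- ===== Notes on version B (the rewrite author's own statement) =====
-- stated objective: idiomatic
-- what changed: The single fused loop with five mutable counters is replaced by independent aggregate expressions: per-category counts via countP-style generator sums and a numerics list comprehension whose length and sum give the last two fields.
import Mathlib
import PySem

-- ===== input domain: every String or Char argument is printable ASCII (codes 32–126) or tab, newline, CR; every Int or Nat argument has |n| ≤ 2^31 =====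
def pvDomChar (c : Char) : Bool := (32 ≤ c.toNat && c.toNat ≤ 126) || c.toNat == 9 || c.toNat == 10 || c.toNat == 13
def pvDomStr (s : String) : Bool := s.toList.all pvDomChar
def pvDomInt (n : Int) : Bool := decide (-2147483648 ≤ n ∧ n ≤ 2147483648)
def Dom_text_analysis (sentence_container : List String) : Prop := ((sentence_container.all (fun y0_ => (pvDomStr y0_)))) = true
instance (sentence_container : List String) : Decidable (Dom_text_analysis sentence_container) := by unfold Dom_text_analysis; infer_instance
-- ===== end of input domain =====

-- B replaces A's fused five-counter loop by independent aggregates (counts and a filtered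
-- numerics list); objective: idiomatic, same cost.

-- Shared ports of Python str builtins not in PySem, exact on the ASCII domain
-- (on ASCII, cased = alphabetic; str.isnumeric = str.isdigit).
-- str.isupper(): at least one cased character and no lowercase one.
def pyStrIsupper (s : String) : Bool :=
  s.toList.any PySem.Chars.isupper && !(s.toList.any PySem.Chars.islower)
-- str.islower(): at least one cased character and no uppercase one.
def pyStrIslower (s : String) : Bool :=
  s.toList.any PySem.Chars.islower && !(s.toList.any PySem.Chars.isupper)
-- str.istitle(): CPython's scan — uppercase only after an uncased char, lowercase only
-- after a cased char, and at least one cased char; state = (previous char cased, seen cased).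
def pyIstitleAux : List Char → Bool → Bool → Bool
  | [], _, res => res
  | c :: rest, prev, res =>
    if PySem.Chars.isupper c then
      if prev then false else pyIstitleAux rest true true
    else if PySem.Chars.islower c then
      if !prev then false else pyIstitleAux rest true true
    else pyIstitleAux rest false res
def pyStrIstitle (s : String) : Bool := pyIstitleAux s.toList false false
-- int(word) on a word str.isnumeric accepted (all digits, so ofStr? is some).
def pyIntOf (s : String) : Int := (PySem.Int.ofStr? s).getD 0

-- ===== PORT A =====
def text_analysis (sentence_container : List String) : Int × Int × Int × Int × Int × Int :=
  let get_word_count : Int := (sentence_container.length : Int)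
  let r : Int × Int × Int × Int × Int :=
    sentence_container.foldl
      (fun acc word =>
        let t := if pyStrIstitle word then acc.1 + 1 else acc.1
        let u := if pyStrIsupper word then
                   (if PySem.Str.strIsalpha word then acc.2.1 + 1 else acc.2.1)
                 else acc.2.1
        let l := if pyStrIslower word then acc.2.2.1 + 1 else acc.2.2.1
        let n := if PySem.Str.strIsdigit word then acc.2.2.2.1 + 1 else acc.2.2.2.1
        let s := if PySem.Str.strIsdigit word then acc.2.2.2.2 + pyIntOf word else acc.2.2.2.2
        (t, u, l, n, s))
      (0, 0, 0, 0, 0)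
  (get_word_count, r.1, r.2.1, r.2.2.1, r.2.2.2.1, r.2.2.2.2)

-- ===== PORT B =====
def text_analysis_alt (sentence_container : List String) : Int × Int × Int × Int × Int × Int :=
  let numerics : List Int :=
    (sentence_container.filter (fun w => PySem.Str.strIsdigit w)).map pyIntOf
  ((sentence_container.length : Int),
   (sentence_container.countP pyStrIstitle : Int),
   (sentence_container.countP (fun w => pyStrIsupper w && PySem.Str.strIsalpha w) : Int),
   (sentence_container.countP pyStrIslower : Int),
   (numerics.length : Int),
   numerics.sum)

-- ===== PRECONDITION & SPEC =====
def Spec_text_analysis (sentence_container : List String) (out : Int × Int × Int × Int × Int × Int) : Prop := out = text_analysis_alt sentence_container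
instance (sentence_container : List String) (out : Int × Int × Int × Int × Int × Int) : Decidable (Spec_text_analysis sentence_container out) := by unfold Spec_text_analysis; infer_instance

-- ===== CLAIM (what is proved, stated in full; the proofs are below) =====
def Claim_equal_text_analysis : Prop := ∀ (sentence_container : List String), Dom_text_analysis sentence_container → Spec_text_analysis sentence_container (text_analysis sentence_container)

-- ===== LEMMAS AND PROOFS =====
theorem text_analysis_fold (ws : List String) (t u l n s : Int) :
    ws.foldl
      (fun (acc : Int × Int × Int × Int × Int) word =>
        let t := if pyStrIstitle word then acc.1 + 1 else acc.1
        let u := if pyStrIsupper word then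
                   (if PySem.Str.strIsalpha word then acc.2.1 + 1 else acc.2.1)
                 else acc.2.1
        let l := if pyStrIslower word then acc.2.2.1 + 1 else acc.2.2.1
        let n := if PySem.Str.strIsdigit word then acc.2.2.2.1 + 1 else acc.2.2.2.1
        let s := if PySem.Str.strIsdigit word then acc.2.2.2.2 + pyIntOf word else acc.2.2.2.2
        (t, u, l, n, s))
      (t, u, l, n, s)
    = (t + (ws.countP pyStrIstitle : Int),
       u + (ws.countP (fun w => pyStrIsupper w && PySem.Str.strIsalpha w) : Int),
       l + (ws.countP pyStrIslower : Int),
       n + (((ws.filter (fun w => PySem.Str.strIsdigit w)).map pyIntOf).length : Int),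
       s + ((ws.filter (fun w => PySem.Str.strIsdigit w)).map pyIntOf).sum) := by
  induction ws generalizing t u l n s with
  | nil => simp
  | cons w ws ih =>
    simp only [List.foldl_cons, ih, List.countP_cons, List.filter_cons]
    cases ht : pyStrIstitle w <;> cases hu : pyStrIsupper w <;>
      cases ha : PySem.Str.strIsalpha w <;> cases hl : pyStrIslower w <;>
      cases hd : PySem.Str.strIsdigit w <;>
      simp only [Bool.true_and, Bool.false_and, if_true, List.map_cons, List.sum_cons,
        List.length_cons, Prod.mk.injEq, Bool.and_self] <;>
      push_cast <;> omega

-- ===== VERDICT (by name: the statement is the Claim_ definition above) =====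
theorem text_analysis_spec : Claim_equal_text_analysis := by
  intro ws _
  unfold Spec_text_analysis text_analysis text_analysis_alt
  rw [text_analysis_fold]
  simp
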